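-- pv_equiv track=rewrite | github.com/friedrich-schotte/Lauecollect | expand_scan_points.py | interleave_value
-- ===== SOURCE A (Python) =====
-- def interleave_value(t0, series, begin=False, end=False):
--     """Add t0 between every element of *series*"""
--     T = []
--     if begin:
--         T += [t0]
--     if len(series) > 0:
--         T += [series[0]]
--     for t in series[1:]:
--         T += [t0, t]
--     if end:
--         T += [t0]
--     return T
-- ===== SOURCE B (Python) =====
-- def interleave_value(t0, series, begin=False, end=False):
--     """Add t0 between every element of *series*"""
--     n = len(series)
--     out = [t0] * (2 * n - 1) if n else []
--     out[0::2] = series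
--     if begin:
--         out = [t0] + out
--     if end:
--         out.append(t0)
--     return out
-- ===== Notes on version B (the rewrite author's own statement) =====
-- stated objective: alternative
-- what changed: B replaces A's element-by-element accumulator loop by whole-list operations: it preallocates a t0-filled list of length 2n-1 and overwrites every second slot with series via the strided slice assignment out[0::2] = series, then adjusts the two ends.
import Mathlib
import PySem

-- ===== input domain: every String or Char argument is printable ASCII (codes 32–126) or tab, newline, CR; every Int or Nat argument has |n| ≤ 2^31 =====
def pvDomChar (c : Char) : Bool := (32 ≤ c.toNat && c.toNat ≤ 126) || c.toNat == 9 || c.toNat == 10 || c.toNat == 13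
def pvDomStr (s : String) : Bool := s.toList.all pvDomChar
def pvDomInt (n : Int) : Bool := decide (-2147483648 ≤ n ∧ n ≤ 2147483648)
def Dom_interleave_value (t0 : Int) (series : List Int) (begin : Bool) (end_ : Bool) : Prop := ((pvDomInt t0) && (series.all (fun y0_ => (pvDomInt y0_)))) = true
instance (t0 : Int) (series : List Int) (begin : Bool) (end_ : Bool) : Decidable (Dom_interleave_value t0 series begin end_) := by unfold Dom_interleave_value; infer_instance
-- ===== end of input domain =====

-- B replaces A's accumulator loop by whole-list operations: a preallocated t0-filled list
-- whose even slots are overwritten by a strided slice assignment (objective: alternative).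


-- ===== PORT A =====
def interleave_value (t0 : Int) (series : List Int) (begin : Bool) (end_ : Bool) : List Int :=
  let T : List Int := []
  let T := if begin then T ++ [t0] else T
  let T := if series.length > 0 then T ++ [(PySem.List.pyGet? series 0).getD 0] else T
  let T := (PySem.List.slice series (some 1) none).foldl (fun acc t => acc ++ [t0, t]) T
  if end_ then T ++ [t0] else T

-- ===== PORT B =====
-- strided slice assignment out[0::2] = vals (lengths match on B's inputs: |vals| slots at 0,2,4,…)
def assignStride2 : List Int → List Int → List Int
  | _ :: b :: rest, v :: vs => v :: b :: assignStride2 rest vs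
  | _ :: [], v :: _ => [v]
  | out, _ => out

def interleave_value_alt (t0 : Int) (series : List Int) (begin : Bool) (end_ : Bool) : List Int :=
  let n := series.length
  let out := if n > 0 then List.replicate (2 * n - 1) t0 else ([] : List Int)
  let out := assignStride2 out series
  let out := if begin then [t0] ++ out else out
  if end_ then out ++ [t0] else out

-- ===== PRECONDITION & SPEC =====
def Spec_interleave_value (t0 : Int) (series : List Int) (begin : Bool) (end_ : Bool) (out : List Int) : Prop := out = interleave_value_alt t0 series begin end_
instance (t0 : Int) (series : List Int) (begin : Bool) (end_ : Bool) (out : List Int) : Decidable (Spec_interleave_value t0 series begin end_ out) := by unfold Spec_interleave_value; infer_instance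

-- ===== CLAIM =====
def Claim_equal_interleave_value : Prop := ∀ (t0 : Int) (series : List Int) (begin : Bool) (end_ : Bool), Dom_interleave_value t0 series begin end_ → Spec_interleave_value t0 series begin end_ (interleave_value t0 series begin end_)

-- ===== LEMMAS AND PROOFS =====

-- A's loop over the tail, started from T, appends [t0, t] per tail element.
theorem pv_foldl_flat (t0 : Int) (rest T : List Int) :
    rest.foldl (fun acc t => acc ++ [t0, t]) T = T ++ rest.flatMap (fun x => [t0, x]) := by
  induction rest generalizing T with
  | nil => simp
  | cons r rs ih => simp [List.foldl_cons, ih, List.flatMap_cons]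

-- B's strided assignment into the preallocated t0 block yields head-then-flattened-tail.
theorem assignStride2_replicate (t0 s : Int) (rest : List Int) :
    assignStride2 (List.replicate (2 * (rest.length + 1) - 1) t0) (s :: rest)
      = s :: rest.flatMap (fun x => [t0, x]) := by
  induction rest generalizing s with
  | nil => simp [assignStride2]
  | cons r rs ih =>
      have h : 2 * ((r :: rs).length + 1) - 1 = (2 * (rs.length + 1) - 1) + 1 + 1 := by
        simp [List.length_cons]; omega
      rw [h, List.replicate_succ, List.replicate_succ]
      simp [assignStride2, ih, List.flatMap_cons]

-- ===== VERDICT =====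
theorem interleave_value_spec : Claim_equal_interleave_value := by
  intro t0 series bg en _
  unfold Spec_interleave_value interleave_value interleave_value_alt
  cases series with
  | nil => cases bg <;> cases en <;> simp [PySem.List.slice, assignStride2]
  | cons s rest =>
      simp only [pv_foldl_flat, List.length_cons]
      cases bg <;> cases en <;>
        simp [PySem.List.pyGet?, PySem.List.pyIdx?, PySem.List.slice,
          assignStride2_replicate]
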